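-- pv_equiv track=rewrite | github.com/EmericFo/facilitateurIsograd | exo3/exo3.py | goOnRow
-- ===== SOURCE A (Python) =====
-- def goOnRow(fromPos, toPos, rToRet):
--     toR = toPos[1]
--     if fromPos[1] < toR:
--         fromPos[1] += 1
--         rToRet.append(">")
--         return goOnRow(fromPos, toPos, rToRet)
--     elif fromPos[1] > toR:
--         fromPos[1] -= 1
--         rToRet.append("<")
--         return goOnRow(fromPos, toPos, rToRet)
--     return rToRet
-- ===== SOURCE B (Python) =====
-- def goOnRow(fromPos, toPos, rToRet):
--     # Closed form: compute the signed distance once, jump fromPos[1] to the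
--     # target, and extend rToRet with the repeated direction character.
--     # Net mutations of fromPos and rToRet are the same as A's.
--     d = toPos[1] - fromPos[1]
--     fromPos[1] = toPos[1]
--     rToRet.extend((">" if d > 0 else "<") * abs(d))
--     return rToRet
-- ===== Notes on version B (the rewrite author's own statement) =====
-- stated objective: simpler
-- what changed: Replaces A's one-step-at-a-time recursion with a closed form: compute the signed distance once and extend the result with abs(d) copies of the direction character (same net mutation of fromPos and rToRet).
-- outside the precondition, e.g. on goOnRow([0], [0, 1], []): A raises IndexError, B raises IndexError; on goOnRow([0, 0], [0, 20000], []): A raises RecursionError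
import Mathlib
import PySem

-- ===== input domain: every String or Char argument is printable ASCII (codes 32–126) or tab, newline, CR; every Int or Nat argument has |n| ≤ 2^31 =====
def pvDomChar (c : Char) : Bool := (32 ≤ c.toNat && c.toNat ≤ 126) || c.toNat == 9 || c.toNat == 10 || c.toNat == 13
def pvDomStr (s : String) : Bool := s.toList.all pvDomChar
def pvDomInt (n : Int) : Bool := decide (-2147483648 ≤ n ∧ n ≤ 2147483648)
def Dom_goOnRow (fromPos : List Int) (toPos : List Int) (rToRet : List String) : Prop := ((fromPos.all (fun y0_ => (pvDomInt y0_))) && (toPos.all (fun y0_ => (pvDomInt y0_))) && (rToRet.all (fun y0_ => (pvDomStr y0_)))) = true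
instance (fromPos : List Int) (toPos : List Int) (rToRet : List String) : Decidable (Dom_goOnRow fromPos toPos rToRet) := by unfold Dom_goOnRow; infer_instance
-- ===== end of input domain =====

-- B replaces A's one-step-at-a-time recursion by a closed form (distance computed once,
-- direction character repeated); objective: simpler.  Both Pythons mutate fromPos and
-- rToRet in place with the same net effect; the theorems here are about the return value.

-- helper lemmas the port's decreasing_by cites by name (termination must see them, so they
-- live above the claim block)
theorem pv_len_of_pyGet?_one {xs : List Int} {f : Int}
    (h : PySem.List.pyGet? xs 1 = some f) : 2 ≤ xs.length := by
  by_contra hlen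
  have hnone : PySem.List.pyGet? xs 1 = none :=
    (PySem.List.pyGet?_eq_none_iff xs 1).2 (by simp [PySem.Raise.InRange]; omega)
  rw [h] at hnone
  cases hnone

theorem pv_pyGet?_set_one (xs : List Int) (v : Int) (h : 2 ≤ xs.length) :
    PySem.List.pyGet? (xs.set 1 v) 1 = some v := by
  rw [PySem.List.pyGet?_of_nonneg (xs.set 1 v) (by norm_num : (0:Int) ≤ 1)]
  have h1 : 1 < xs.length := by omega
  simp [h1]

-- ===== PORT A =====
-- A: recursive; reads toPos[1] and fromPos[1] (pyGet?: none = IndexError, excluded by Pre_),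
-- steps fromPos[1] by one towards toR, appending ">"/"<", until equal.
def goOnRow (fromPos : List Int) (toPos : List Int) (rToRet : List String) : List String :=
  match h1 : PySem.List.pyGet? toPos 1, h2 : PySem.List.pyGet? fromPos 1 with
  | some toR, some f =>
    if f < toR then
      goOnRow (fromPos.set 1 (f + 1)) toPos (rToRet ++ [">"])
    else if f > toR then
      goOnRow (fromPos.set 1 (f - 1)) toPos (rToRet ++ ["<"])
    else rToRet
  | _, _ => rToRet  -- IndexError in Python; outside Pre_
termination_by (((PySem.List.pyGet? toPos 1).getD 0) - ((PySem.List.pyGet? fromPos 1).getD 0)).natAbs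
decreasing_by
  · have hl := pv_len_of_pyGet?_one h2
    rw [h1, pv_pyGet?_set_one _ _ hl, h2]
    simp only [Option.getD_some]
    omega
  · have hl := pv_len_of_pyGet?_one h2
    rw [h1, pv_pyGet?_set_one _ _ hl, h2]
    simp only [Option.getD_some]
    omega

-- ===== PORT B =====
-- B: closed form — d = toPos[1] - fromPos[1]; rToRet extended with abs(d) copies of the
-- direction character (">" if d > 0 else "<").
def goOnRow_alt (fromPos : List Int) (toPos : List Int) (rToRet : List String) : List String :=
  match PySem.List.pyGet? toPos 1 with
  | none => rToRet  -- IndexError in Python; outside Pre_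
  | some toR =>
    match PySem.List.pyGet? fromPos 1 with
    | none => rToRet  -- IndexError in Python; outside Pre_
    | some f =>
      let d := toR - f
      rToRet ++ List.replicate d.natAbs (if d > 0 then ">" else "<")

-- ===== PRECONDITION & SPEC =====
-- Pre_ excludes exactly the inputs on which A RAISES: (i) lists shorter than 2, where both
-- programs raise IndexError, and (ii) row distances above 9000, where A's one-stack-frame-per-
-- step recursion exhausts the interpreter's recursion limit and raises RecursionError (under
-- CPython's default limit this already happens near distance 998; the bound sits just under
-- the highest limit A is run with here, so everything excluded by it really raises).
def Pre_goOnRow (fromPos : List Int) (toPos : List Int) (rToRet : List String) : Prop :=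
  2 ≤ fromPos.length ∧ 2 ≤ toPos.length ∧ ((toPos.getD 1 0) - (fromPos.getD 1 0)).natAbs ≤ 9000
instance (fromPos : List Int) (toPos : List Int) (rToRet : List String) : Decidable (Pre_goOnRow fromPos toPos rToRet) := by unfold Pre_goOnRow; infer_instance
def pvWitness_goOnRow : List Int × List Int × List String := ([0, 0], [0, 3], ["x"])

def Spec_goOnRow (fromPos : List Int) (toPos : List Int) (rToRet : List String) (out : List String) : Prop := out = goOnRow_alt fromPos toPos rToRet
instance (fromPos : List Int) (toPos : List Int) (rToRet : List String) (out : List String) : Decidable (Spec_goOnRow fromPos toPos rToRet out) := by unfold Spec_goOnRow; infer_instance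

-- ===== CLAIM (what is proved, stated in full; the proofs are below) =====
def Claim_equal_goOnRow : Prop := ∀ (fromPos : List Int) (toPos : List Int) (rToRet : List String), Dom_goOnRow fromPos toPos rToRet → Pre_goOnRow fromPos toPos rToRet → Spec_goOnRow fromPos toPos rToRet (goOnRow fromPos toPos rToRet)

-- ===== LEMMAS AND PROOFS =====

theorem pv_pyGet?_one_getD {xs : List Int} (h : 2 ≤ xs.length) :
    PySem.List.pyGet? xs 1 = some (xs.getD 1 0) := by
  rw [PySem.List.pyGet?_of_nonneg xs (by norm_num : (0:Int) ≤ 1)]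
  have h1 : 1 < xs.length := by omega
  simp [List.getD, List.getElem?_eq_getElem h1]

-- A moving rightwards by n steps appends n ">"s
theorem pv_goOnRow_up (n : Nat) : ∀ (fromPos toPos : List Int) (rToRet : List String)
    (toR f : Int), PySem.List.pyGet? toPos 1 = some toR →
    PySem.List.pyGet? fromPos 1 = some f → toR = f + n →
    goOnRow fromPos toPos rToRet = rToRet ++ List.replicate n ">" := by
  induction n with
  | zero =>
    intro fromPos toPos rToRet toR f h1 h2 heq
    rw [goOnRow, h1, h2]
    simp [heq]
  | succ m ih =>
    intro fromPos toPos rToRet toR f h1 h2 heq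
    have hl := pv_len_of_pyGet?_one h2
    rw [goOnRow, h1, h2]
    dsimp only
    have hlt : f < toR := by omega
    rw [if_pos hlt,
      ih _ _ _ toR (f + 1) h1 (pv_pyGet?_set_one _ _ hl) (by push_cast at heq ⊢; omega)]
    simp [List.replicate_succ]

-- A moving leftwards by n steps appends n "<"s
theorem pv_goOnRow_down (n : Nat) : ∀ (fromPos toPos : List Int) (rToRet : List String)
    (toR f : Int), PySem.List.pyGet? toPos 1 = some toR →
    PySem.List.pyGet? fromPos 1 = some f → f = toR + n →
    goOnRow fromPos toPos rToRet = rToRet ++ List.replicate n "<" := by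
  induction n with
  | zero =>
    intro fromPos toPos rToRet toR f h1 h2 heq
    rw [goOnRow, h1, h2]
    simp [heq]
  | succ m ih =>
    intro fromPos toPos rToRet toR f h1 h2 heq
    have hl := pv_len_of_pyGet?_one h2
    rw [goOnRow, h1, h2]
    dsimp only
    have hgt : f > toR := by omega
    rw [if_neg (by omega : ¬ f < toR), if_pos hgt,
      ih _ _ _ toR (f - 1) h1 (pv_pyGet?_set_one _ _ hl) (by push_cast at heq ⊢; omega)]
    simp [List.replicate_succ]

-- ===== VERDICT (by name: the statement is the Claim_ definition above) =====
theorem goOnRow_spec : Claim_equal_goOnRow := by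
  intro fromPos toPos rToRet _ hpre
  obtain ⟨hf, ht, -⟩ := hpre
  have h1 := pv_pyGet?_one_getD ht
  have h2 := pv_pyGet?_one_getD hf
  set toR := toPos.getD 1 0 with htoR
  set f := fromPos.getD 1 0 with hff
  unfold Spec_goOnRow goOnRow_alt
  rw [h1, h2]
  dsimp only
  rcases lt_trichotomy f toR with hlt | heq | hgt
  · have hd : toR - f > 0 := by omega
    rw [pv_goOnRow_up (toR - f).natAbs fromPos toPos rToRet toR f h1 h2 (by omega),
      if_pos hd]
  · rw [pv_goOnRow_up 0 fromPos toPos rToRet toR f h1 h2 (by omega)]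
    simp [heq]
  · have hd : ¬ (toR - f > 0) := by omega
    rw [pv_goOnRow_down (toR - f).natAbs fromPos toPos rToRet toR f h1 h2 (by omega),
      if_neg hd]
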